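-- pv_equiv track=rewrite | github.com/bashrc2/epicyon | webapp_utils.py | _is_nsfw
-- ===== SOURCE A (Python) =====
-- def _is_nsfw(content: str) -> bool:
--     """Does the given content indicate nsfw?
--     """
--     content_lower = content.lower()
--     nsfw_tags = (
--         'nsfw', 'porn', 'pr0n', 'explicit', 'lewd',
--         'nude', 'boob', 'erotic', 'sex'
--     )
--     for tag_name in nsfw_tags:
--         if tag_name in content_lower:
--             return True
--     return False
-- ===== SOURCE B (Python) =====
-- def _is_nsfw(content: str) -> bool:
--     """Does the given content indicate nsfw?
--     """
--     nsfw_tags = (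
--         'nsfw', 'porn', 'pr0n', 'explicit', 'lewd',
--         'nude', 'boob', 'erotic', 'sex'
--     )
--     lowered = content.lower()
--     for i in range(len(lowered)):
--         if lowered.startswith(nsfw_tags, i):
--             return True
--     return False
-- ===== Notes on version B (the rewrite author's own statement) =====
-- stated objective: alternative
-- what changed: B makes one left-to-right scan over the positions of the lowered content, asking at each position whether any NSFW tag starts there (a single startswith with the whole tag tuple), instead of A's separate full substring search per tag.
import Mathlib
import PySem

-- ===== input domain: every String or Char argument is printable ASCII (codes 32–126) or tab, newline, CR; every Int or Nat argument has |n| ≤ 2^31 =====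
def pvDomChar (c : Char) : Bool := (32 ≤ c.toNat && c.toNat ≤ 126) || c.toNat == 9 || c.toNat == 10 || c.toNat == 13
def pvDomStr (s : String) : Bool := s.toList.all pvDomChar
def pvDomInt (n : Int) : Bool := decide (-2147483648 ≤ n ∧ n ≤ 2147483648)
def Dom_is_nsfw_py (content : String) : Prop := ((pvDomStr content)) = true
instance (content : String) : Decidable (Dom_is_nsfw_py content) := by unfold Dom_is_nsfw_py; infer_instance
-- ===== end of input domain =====

-- ===== PORT A =====
-- A: lowers the content, then for each tag in turn tests substring membership (early return True).
def pvNsfwTags : List String :=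
  ["nsfw", "porn", "pr0n", "explicit", "lewd", "nude", "boob", "erotic", "sex"]

def is_nsfw_py (content : String) : Bool :=
  let content_lower := PySem.Str.lower content
  pvNsfwTags.any (fun tag_name => PySem.Str.isIn tag_name content_lower)

-- ===== PORT B =====
-- B: one positional scan of the lowered content; at each position ask whether any tag starts there.
def pvNsfwTagsChars : List (List Char) :=
  [['n','s','f','w'], ['p','o','r','n'], ['p','r','0','n'],
   ['e','x','p','l','i','c','i','t'], ['l','e','w','d'],
   ['n','u','d','e'], ['b','o','o','b'], ['e','r','o','t','i','c'],
   ['s','e','x']]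

def pvScanNsfw : List Char → Bool
  | [] => false
  | c :: rest =>
      pvNsfwTagsChars.any (fun t => t.isPrefixOf (c :: rest)) || pvScanNsfw rest

def is_nsfw_py_alt (content : String) : Bool :=
  pvScanNsfw (PySem.Chars.lower content.toList)

-- ===== PRECONDITION & SPEC =====
def Spec_is_nsfw_py (content : String) (out : Bool) : Prop := out = is_nsfw_py_alt content
instance (content : String) (out : Bool) : Decidable (Spec_is_nsfw_py content out) := by unfold Spec_is_nsfw_py; infer_instance

-- ===== CLAIM (what is proved, stated in full; the proofs are below) =====
def Claim_equal_is_nsfw_py : Prop := ∀ (content : String), Dom_is_nsfw_py content → Spec_is_nsfw_py content (is_nsfw_py content)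

-- ===== LEMMAS AND PROOFS =====

-- B's scan finds exactly the infix occurrences of the (all nonempty) tags.
lemma pvScanNsfw_iff (cs : List Char) :
    pvScanNsfw cs = true ↔ ∃ t ∈ pvNsfwTagsChars, t <:+: cs := by
  induction cs with
  | nil =>
      simp [pvScanNsfw, List.infix_nil, pvNsfwTagsChars]
  | cons c rest ih =>
      simp only [pvScanNsfw, Bool.or_eq_true, List.any_eq_true,
        List.isPrefixOf_iff_prefix, ih, List.infix_cons_iff]
      constructor
      · rintro (⟨t, ht, hp⟩ | ⟨t, ht, hi⟩)
        · exact ⟨t, ht, Or.inl hp⟩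
        · exact ⟨t, ht, Or.inr hi⟩
      · rintro ⟨t, ht, hp | hi⟩
        · exact Or.inl ⟨t, ht, hp⟩
        · exact Or.inr ⟨t, ht, hi⟩

-- A's per-tag substring tests decide the same property.
lemma is_nsfw_py_iff (content : String) :
    is_nsfw_py content = true ↔
      ∃ t ∈ pvNsfwTagsChars, t <:+: PySem.Chars.lower content.toList := by
  simp only [is_nsfw_py, List.any_eq_true, PySem.Str.isIn_iff_infix,
    PySem.Str.toList_lower]
  constructor
  · rintro ⟨tag, htag, hinf⟩
    refine ⟨tag.toList, ?_, hinf⟩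
    fin_cases htag <;> decide
  · rintro ⟨t, ht, hinf⟩
    fin_cases ht
    · exact ⟨"nsfw", by decide, hinf⟩
    · exact ⟨"porn", by decide, hinf⟩
    · exact ⟨"pr0n", by decide, hinf⟩
    · exact ⟨"explicit", by decide, hinf⟩
    · exact ⟨"lewd", by decide, hinf⟩
    · exact ⟨"nude", by decide, hinf⟩
    · exact ⟨"boob", by decide, hinf⟩
    · exact ⟨"erotic", by decide, hinf⟩
    · exact ⟨"sex", by decide, hinf⟩

-- ===== VERDICT (by name: the statement is the Claim_ definition above) =====
theorem is_nsfw_py_spec : Claim_equal_is_nsfw_py := by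
  intro content _
  unfold Spec_is_nsfw_py
  rw [Bool.eq_iff_iff, is_nsfw_py_iff, is_nsfw_py_alt, pvScanNsfw_iff]
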